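-- pv_equiv track=rewrite | github.com/Bharadwaj2552/metadata-service-fastapi | app/utils/__init__.py | get_downstream_datasets
-- ===== SOURCE A (Python) =====
-- from typing import Dict, Set, List, Optional
--
-- def get_downstream_datasets(
--     reverse_graph: Dict[int, List[int]], dataset_id: int
-- ) -> Set[int]:
--     """
--     Get all downstream datasets for a given dataset.
--
--     Args:
--         reverse_graph: Reverse adjacency list representation of the lineage graph
--         dataset_id: The dataset ID to find downstream for
--
--     Returns:
--         Set of downstream dataset IDs
--     """
--     downstream: Set[int] = set()
--
--     def dfs(node: int) -> None:
--         """Recursive DFS to find all downstream nodes"""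
--         for downstream_id in reverse_graph.get(node, []):
--             if downstream_id not in downstream:
--                 downstream.add(downstream_id)
--                 dfs(downstream_id)
--
--     dfs(dataset_id)
--     return downstream
-- ===== SOURCE B (Python) =====
-- from typing import Dict, Set, List
--
-- def get_downstream_datasets(
--     reverse_graph: Dict[int, List[int]], dataset_id: int
-- ) -> Set[int]:
--     """Iterative DFS with an explicit stack of neighbor iterators (no recursion)."""
--     downstream: Set[int] = set()
--     stack = [iter(reverse_graph.get(dataset_id, []))]
--     while stack:
--         for neighbor in stack[-1]:
--             if neighbor not in downstream:
--                 downstream.add(neighbor)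
--                 stack.append(iter(reverse_graph.get(neighbor, [])))
--                 break
--         else:
--             stack.pop()
--     return downstream
-- ===== Notes on version B (the rewrite author's own statement) =====
-- stated objective: alternative
-- what changed: The recursive nested-function DFS is replaced by an iterative DFS driven by an explicit stack of neighbor iterators, so no recursion (and no Python recursion-depth limit) is involved while the same discovery-order set is produced.
import Mathlib
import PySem

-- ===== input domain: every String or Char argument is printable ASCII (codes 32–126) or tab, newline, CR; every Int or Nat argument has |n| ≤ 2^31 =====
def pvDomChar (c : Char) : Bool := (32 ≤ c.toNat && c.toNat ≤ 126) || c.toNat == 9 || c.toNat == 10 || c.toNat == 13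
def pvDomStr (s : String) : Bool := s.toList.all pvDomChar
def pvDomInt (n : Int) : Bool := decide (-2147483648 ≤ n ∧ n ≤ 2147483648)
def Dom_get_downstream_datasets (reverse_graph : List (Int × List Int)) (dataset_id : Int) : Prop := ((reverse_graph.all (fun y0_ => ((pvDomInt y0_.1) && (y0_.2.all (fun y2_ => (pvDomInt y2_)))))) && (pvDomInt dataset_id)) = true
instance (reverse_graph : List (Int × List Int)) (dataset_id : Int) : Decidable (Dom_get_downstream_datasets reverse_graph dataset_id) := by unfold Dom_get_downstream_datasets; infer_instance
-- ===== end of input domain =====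

-- B replaces A's recursive DFS by an iterative DFS over an explicit stack of neighbor lists
-- (same discovery order, no recursion); objective: alternative decomposition, same cost.

-- ===== PORT A =====
-- all neighbor ids appearing in the graph's value lists (bounds the number of possible set insertions)
def pvValues (g : List (Int × List Int)) : List Int := (g.map Prod.snd).flatten

-- every element of reverse_graph.get(node, []) is a value of the graph (cited by port B's invariant)
theorem pvGetD_subset_values (g : List (Int × List Int)) (x y : Int)
    (h : y ∈ PySem.Dict.getD (PySem.Dict.mk g) x []) : y ∈ pvValues g := by
  induction g with
  | nil => simp [PySem.Dict.getD, PySem.Dict.get?] at h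
  | cons p rest ih =>
    rw [PySem.Dict.getD_eq_get?_getD, PySem.Dict.get?_mk_cons] at h
    by_cases hk : p.1 == x
    · simp [hk] at h
      exact List.mem_flatten.2 ⟨p.2, by simp, h⟩
    · simp [hk] at h
      have := ih (by rw [PySem.Dict.getD_eq_get?_getD]; exact h)
      simp only [pvValues, List.map_cons, List.flatten_cons, List.mem_append]
      exact Or.inr this

mutual
-- dfs(node): for downstream_id in reverse_graph.get(node, []): if not in downstream: add; dfs
-- (fuel only makes the nested recursion total; one unit is spent per dfs() entry)
def pvDfsA (g : List (Int × List Int)) (fuel : Nat) (node : Int) (s : PySem.Set Int) : PySem.Set Int :=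
  match fuel with
  | 0 => s
  | f + 1 => pvGoA g f (PySem.Dict.getD (PySem.Dict.mk g) node []) s
termination_by (fuel, 0)

-- the body of the 'for downstream_id in …' loop
def pvGoA (g : List (Int × List Int)) (fuel : Nat) (frame : List Int) (s : PySem.Set Int) : PySem.Set Int :=
  match frame with
  | [] => s
  | x :: xs =>
    if x ∈ s then pvGoA g fuel xs s
    else pvGoA g fuel xs (pvDfsA g fuel x (PySem.Set.add s x))
termination_by (fuel, frame.length + 1)
end

def get_downstream_datasets (reverse_graph : List (Int × List Int)) (dataset_id : Int) : List Int :=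
  pvDfsA reverse_graph ((pvValues reverse_graph).length + 2) dataset_id PySem.Set.empty

-- ===== PORT B =====
-- number of graph values not yet in the set (termination measure for the worklist loop)
def pvMissing (g : List (Int × List Int)) (s : PySem.Set Int) : Nat :=
  ((pvValues g).filter (fun y => !decide (y ∈ s))).length

-- general strict filter-length decrease (termination of pvBgo cites it)
theorem pvFilterLenLt {l : List Int} {p q : Int → Bool}
    (hpq : ∀ a, p a = true → q a = true) {a : Int}
    (ha : a ∈ l) (hqa : q a = true) (hpa : p a = false) :
    (l.filter p).length < (l.filter q).length := by
  induction l with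
  | nil => cases ha
  | cons b t ih =>
    rcases List.mem_cons.1 ha with rfl | hat
    · have hle : (t.filter p).length ≤ (t.filter q).length :=
        (List.monotone_filter_right t hpq).length_le
      simp [hpa, hqa]; omega
    · have h' := ih hat
      by_cases hpb : p b = true
      · simp [hpb, hpq b hpb]; omega
      · have hpb' : p b = false := by simpa using hpb
        by_cases hqb : q b = true
        · simp [hpb', hqb]; omega
        · have hqb' : q b = false := by simpa using hqb
          simp [hpb', hqb']; omega

-- adding a not-yet-seen graph value strictly decreases pvMissing (termination of pvBgo cites it)
theorem pvMissing_add_lt (g : List (Int × List Int)) (s : PySem.Set Int) (x : Int)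
    (hxv : x ∈ pvValues g) (hxs : x ∉ s) :
    pvMissing g (PySem.Set.add s x) < pvMissing g s := by
  apply pvFilterLenLt (a := x)
  · intro a hap
    simp only [Bool.not_eq_eq_eq_not, Bool.not_true, decide_eq_false_iff_not] at hap ⊢
    intro has; exact hap (by rw [PySem.Set.mem_add]; exact Or.inl has)
  · exact hxv
  · simpa using hxs
  · simp [PySem.Set.mem_add]

-- while stack: for neighbor in stack[-1]: if new: add, push its list, break; else pop
-- (the hypothesis hf only certifies termination: every pending neighbor is a graph value)
def pvBgo (g : List (Int × List Int)) (frames : List (List Int)) (s : PySem.Set Int)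
    (hf : ∀ fr ∈ frames, ∀ y ∈ fr, y ∈ pvValues g) : PySem.Set Int :=
  match frames with
  | [] => s
  | [] :: rest => pvBgo g rest s (fun fr hfr => hf fr (List.mem_cons_of_mem _ hfr))
  | (x :: xs) :: rest =>
    if hx : x ∈ s then
      pvBgo g (xs :: rest) s (by
        intro fr hfr y hy
        rcases List.mem_cons.1 hfr with rfl | h
        · exact hf (x :: fr) (List.mem_cons_self) y (List.mem_cons_of_mem _ hy)
        · exact hf fr (List.mem_cons_of_mem _ h) y hy)
    else
      pvBgo g (PySem.Dict.getD (PySem.Dict.mk g) x [] :: xs :: rest) (PySem.Set.add s x) (by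
        intro fr hfr y hy
        rcases List.mem_cons.1 hfr with rfl | h
        · exact pvGetD_subset_values g x y hy
        · rcases List.mem_cons.1 h with rfl | h'
          · exact hf (x :: fr) (List.mem_cons_self) y (List.mem_cons_of_mem _ hy)
          · exact hf fr (List.mem_cons_of_mem _ h') y hy)
termination_by (pvMissing g s, (frames.map (fun fr => fr.length + 1)).sum)
decreasing_by
  · apply Prod.Lex.right' <;> simp
  · apply Prod.Lex.right' <;> simp
  · apply Prod.Lex.left
    exact pvMissing_add_lt g s x (hf (x :: xs) (List.mem_cons_self) x (List.mem_cons_self)) hx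

def get_downstream_datasets_alt (reverse_graph : List (Int × List Int)) (dataset_id : Int) : List Int :=
  pvBgo reverse_graph [PySem.Dict.getD (PySem.Dict.mk reverse_graph) dataset_id []] PySem.Set.empty
    (by intro fr hfr y hy
        rcases List.mem_cons.1 hfr with rfl | h
        · exact pvGetD_subset_values reverse_graph dataset_id y hy
        · cases h)

-- ===== PRECONDITION & SPEC =====
def Spec_get_downstream_datasets (reverse_graph : List (Int × List Int)) (dataset_id : Int) (out : List Int) : Prop := out = get_downstream_datasets_alt reverse_graph dataset_id
instance (reverse_graph : List (Int × List Int)) (dataset_id : Int) (out : List Int) : Decidable (Spec_get_downstream_datasets reverse_graph dataset_id out) := by unfold Spec_get_downstream_datasets; infer_instance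

-- ===== CLAIM (what is proved, stated in full; the proofs are below) =====
def Claim_equal_get_downstream_datasets : Prop := ∀ (reverse_graph : List (Int × List Int)) (dataset_id : Int), Dom_get_downstream_datasets reverse_graph dataset_id → Spec_get_downstream_datasets reverse_graph dataset_id (get_downstream_datasets reverse_graph dataset_id)

-- ===== LEMMAS AND PROOFS =====

-- the running set only grows
theorem pvMem_goA (g : List (Int × List Int)) :
    ∀ (fuel : Nat) (frame : List Int) (s : PySem.Set Int) (y : Int),
      y ∈ s → y ∈ pvGoA g fuel frame s := by
  intro fuel
  induction fuel with
  | zero =>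
    intro frame
    induction frame with
    | nil => intro s y h; simpa [pvGoA] using h
    | cons x xs ih =>
      intro s y h
      by_cases hx : x ∈ s
      · rw [pvGoA, if_pos hx]; exact ih s y h
      · rw [pvGoA, if_neg hx]
        exact ih _ y (by simp [pvDfsA, PySem.Set.mem_add]; exact Or.inl h)
  | succ f ihf =>
    intro frame
    induction frame with
    | nil => intro s y h; simpa [pvGoA] using h
    | cons x xs ih =>
      intro s y h
      by_cases hx : x ∈ s
      · rw [pvGoA, if_pos hx]; exact ih s y h
      · rw [pvGoA, if_neg hx]
        refine ih _ y ?_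
        rw [pvDfsA]
        exact ihf _ _ y (by rw [PySem.Set.mem_add]; exact Or.inl h)

-- pvMissing is antitone in the set
theorem pvMissing_mono (g : List (Int × List Int)) (s t : PySem.Set Int)
    (h : ∀ y ∈ s, y ∈ t) : pvMissing g t ≤ pvMissing g s := by
  unfold pvMissing
  apply List.Sublist.length_le
  apply List.monotone_filter_right
  intro y hy
  simp only [Bool.not_eq_eq_eq_not, Bool.not_true, decide_eq_false_iff_not] at hy ⊢
  intro hyt; exact hy (h y hyt)

-- above the pvMissing threshold the fuel does not matter
theorem pvGoA_fuel_congr (g : List (Int × List Int)) :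
    ∀ (n : Nat) (s : PySem.Set Int) (frame : List Int) (f₁ f₂ : Nat),
      pvMissing g s ≤ n → (∀ y ∈ frame, y ∈ pvValues g) →
      pvMissing g s < f₁ → pvMissing g s < f₂ →
      pvGoA g f₁ frame s = pvGoA g f₂ frame s := by
  intro n
  induction n using Nat.strong_induction_on with
  | _ n IH =>
    intro s frame
    induction frame with
    | nil => intro f₁ f₂ _ _ _ _; simp [pvGoA]
    | cons x xs ih =>
      intro f₁ f₂ hn hfr h1 h2
      by_cases hx : x ∈ s
      · rw [pvGoA, if_pos hx, pvGoA, if_pos hx]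
        exact ih f₁ f₂ hn (fun y hy => hfr y (List.mem_cons_of_mem _ hy)) h1 h2
      · rw [pvGoA, if_neg hx, pvGoA, if_neg hx]
        have hxv : x ∈ pvValues g := hfr x List.mem_cons_self
        have hmlt : pvMissing g (PySem.Set.add s x) < pvMissing g s :=
          pvMissing_add_lt g s x hxv hx
        obtain ⟨f₁', rfl⟩ : ∃ k, f₁ = k + 1 := ⟨f₁ - 1, by omega⟩
        obtain ⟨f₂', rfl⟩ : ∃ k, f₂ = k + 1 := ⟨f₂ - 1, by omega⟩
        have hsub := pvGetD_subset_values g x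
        have hmn : pvMissing g (PySem.Set.add s x) < n := by omega
        have key : pvDfsA g (f₁' + 1) x (PySem.Set.add s x)
                 = pvDfsA g (f₂' + 1) x (PySem.Set.add s x) := by
          rw [pvDfsA, pvDfsA]
          exact IH (pvMissing g (PySem.Set.add s x)) hmn _ _ f₁' f₂' le_rfl
            (fun y hy => hsub y hy) (by omega) (by omega)
        rw [key]
        set t := pvDfsA g (f₂' + 1) x (PySem.Set.add s x) with ht
        have htmem : ∀ y ∈ PySem.Set.add s x, y ∈ t := by
          intro y hy; rw [ht, pvDfsA]; exact pvMem_goA g f₂' _ _ y hy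
        have hmt : pvMissing g t ≤ pvMissing g (PySem.Set.add s x) :=
          pvMissing_mono g _ t htmem
        exact IH (pvMissing g t) (by omega) t xs (f₁' + 1) (f₂' + 1) le_rfl
          (fun y hy => hfr y (List.mem_cons_of_mem _ hy)) (by omega) (by omega)

-- the worklist loop equals a frame-by-frame run of A's loop body (any sufficient fuel)
theorem pvBgo_eq_foldl (g : List (Int × List Int)) :
    ∀ (frames : List (List Int)) (s : PySem.Set Int)
      (hf : ∀ fr ∈ frames, ∀ y ∈ fr, y ∈ pvValues g) (fuel : Nat),
      pvMissing g s < fuel →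
      pvBgo g frames s hf = frames.foldl (fun s fr => pvGoA g fuel fr s) s := by
  intro frames s hf
  induction frames, s, hf using pvBgo.induct g with
  | case1 s hf _ => intro fuel _; simp [pvBgo]
  | case2 s rest hf _ ih =>
    intro fuel hfu
    rw [pvBgo, ih fuel hfu]
    simp [pvGoA]
  | case3 s x xs rest hf hx _ ih =>
    intro fuel hfu
    rw [pvBgo, dif_pos hx, ih fuel hfu]
    simp only [List.foldl_cons]
    rw [pvGoA, if_pos hx]
  | case4 s x xs rest hf hx _ ih =>
    intro fuel hfu
    have hxv : x ∈ pvValues g := hf (x :: xs) List.mem_cons_self x List.mem_cons_self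
    have hmlt : pvMissing g (PySem.Set.add s x) < pvMissing g s :=
      pvMissing_add_lt g s x hxv hx
    rw [pvBgo, dif_neg hx, ih fuel (by omega)]
    simp only [List.foldl_cons]
    rw [pvGoA, if_neg hx]
    obtain ⟨f', rfl⟩ : ∃ k, fuel = k + 1 := ⟨fuel - 1, by omega⟩
    rw [pvDfsA]
    refine congrArg (fun t => List.foldl (fun s fr => pvGoA g (f' + 1) fr s) t rest) ?_
    exact congrArg (pvGoA g (f' + 1) xs)
      (pvGoA_fuel_congr g (pvMissing g (PySem.Set.add s x)) _ _ (f' + 1) f' le_rfl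
        (fun y hy => pvGetD_subset_values g x y hy) (by omega) (by omega))

-- ===== VERDICT (by name: the statement is the Claim_ definition above) =====
theorem get_downstream_datasets_spec : Claim_equal_get_downstream_datasets := by
  intro g id _dom
  unfold Spec_get_downstream_datasets get_downstream_datasets get_downstream_datasets_alt
  have hN : pvMissing g PySem.Set.empty ≤ (pvValues g).length :=
    List.length_filter_le _ _
  rw [pvBgo_eq_foldl g _ _ _ ((pvValues g).length + 1) (by omega)]
  rw [pvDfsA]
  simp [List.foldl_cons]
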